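-- pv_equiv track=rewrite | github.com/nkanderson/intrinsic-memory-SNNs | 2_training_and_simulation/train/scripts/history_coefficients.py | slow_decay_bitshift
-- ===== SOURCE A (Python) =====
-- def slow_decay_bitshift(history_length: int) -> list[int]:
--     """
--     Generate slow-decay bit-shift amounts with special case for first coefficient.
--
--     This produces: [0, 1, 1, 2, 2, 3, 3, ...]
--
--     The first coefficient (shift 0) does not repeat. Starting from the second position,
--     each shift amount appears twice before incrementing.
--
--     Args:
--         history_length: Number of shift amounts to generate
--
--     Returns:
--         List of shift amounts where amounts repeat (except first)
--     """
--     shift_amounts = []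
--     for k in range(history_length):
--         if k == 0:
--             # First coefficient: shift by 0
--             shift_amount = 0
--         else:
--             # For k >= 1: shift by (k+1)//2, so k=1,2 -> shift 1; k=3,4 -> shift 2, etc.
--             shift_amount = (k + 1) // 2
--         shift_amounts.append(shift_amount)
--     return shift_amounts
-- ===== SOURCE B (Python) =====
-- def slow_decay_bitshift(history_length: int) -> list[int]:
--     """Run-length emission: append 0 once, then each shift j twice while room remains."""
--     result = []
--     if history_length > 0:
--         result.append(0)
--         j = 1
--         while len(result) < history_length:
--             result.append(j)
--             if len(result) < history_length:
--                 result.append(j)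
--             j += 1
--     return result
-- ===== Notes on version B (the rewrite author's own statement) =====
-- stated objective: alternative
-- what changed: B builds the list by run-length emission (append 0 once, then each shift value twice while room remains) instead of computing (k+1)//2 per index.
import Mathlib
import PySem

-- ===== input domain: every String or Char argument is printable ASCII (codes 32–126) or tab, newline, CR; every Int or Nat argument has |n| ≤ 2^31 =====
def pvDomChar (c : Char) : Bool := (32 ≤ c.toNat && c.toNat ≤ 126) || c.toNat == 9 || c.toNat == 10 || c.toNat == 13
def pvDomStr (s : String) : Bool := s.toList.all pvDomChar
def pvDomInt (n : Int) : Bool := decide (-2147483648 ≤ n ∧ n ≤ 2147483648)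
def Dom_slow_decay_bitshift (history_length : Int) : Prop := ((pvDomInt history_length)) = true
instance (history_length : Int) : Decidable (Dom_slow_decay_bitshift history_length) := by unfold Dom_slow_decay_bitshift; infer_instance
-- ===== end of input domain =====

-- B differs from A by decomposition only: run-length emission instead of the per-index formula; same values.

-- ===== PORT A =====
-- for k in range(history_length): append 0 if k == 0 else (k+1)//2
def slow_decay_bitshift (history_length : Int) : List Int :=
  (PySem.List.pyRange 0 history_length 1).foldl
    (fun acc k => acc ++ [if k = 0 then 0 else PySem.Int.floordiv (k + 1) 2]) []

-- ===== PORT B =====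
-- the while loop: one iteration appends j (and a second j if room remains) and increments j;
-- 'remaining' is history_length - len(result), which decreases by 1 or 2 each iteration.
def pvAltLoop (j : Int) (remaining : Nat) : List Int :=
  match remaining with
  | 0 => []
  | 1 => [j]
  | n + 2 => j :: j :: pvAltLoop (j + 1) n

def slow_decay_bitshift_alt (history_length : Int) : List Int :=
  if 0 < history_length then 0 :: pvAltLoop 1 (history_length - 1).toNat else []

-- ===== PRECONDITION & SPEC =====
def Spec_slow_decay_bitshift (history_length : Int) (out : List Int) : Prop := out = slow_decay_bitshift_alt history_length
instance (history_length : Int) (out : List Int) : Decidable (Spec_slow_decay_bitshift history_length out) := by unfold Spec_slow_decay_bitshift; infer_instance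

-- ===== CLAIM (what is proved, stated in full; the proofs are below) =====
def Claim_equal_slow_decay_bitshift : Prop := ∀ (history_length : Int), Dom_slow_decay_bitshift history_length → Spec_slow_decay_bitshift history_length (slow_decay_bitshift history_length)

-- ===== LEMMAS AND PROOFS =====

-- B's loop, characterised: element i of pvAltLoop j m is j + i/2
theorem pvAltLoop_eq (m : Nat) (j : Int) :
    pvAltLoop j m = (List.range m).map (fun i => j + ((i / 2 : Nat) : Int)) := by
  induction m using Nat.strong_induction_on generalizing j with
  | _ m ih =>
    match m with
    | 0 => simp [pvAltLoop]
    | 1 => simp [pvAltLoop, List.range_succ]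
    | n + 2 =>
      rw [pvAltLoop, ih n (by omega) (j + 1)]
      refine List.ext_getElem (by simp) ?_
      intro i h1 h2
      simp only [List.length_cons, List.length_map, List.length_range] at h1 h2
      match i with
      | 0 => simp
      | 1 => simp
      | i + 2 =>
        simp only [List.getElem_cons_succ, List.getElem_map, List.getElem_range]
        have : (i + 2) / 2 = i / 2 + 1 := by omega
        rw [this]
        push_cast
        ring

theorem slow_decay_bitshift_spec : Claim_equal_slow_decay_bitshift := by
  intro n _
  unfold Spec_slow_decay_bitshift slow_decay_bitshift slow_decay_bitshift_alt
  rw [PySem.List.foldl_append_singleton_eq_map, PySem.List.pyRange_one]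
  by_cases hn : 0 < n
  · rw [if_pos hn, pvAltLoop_eq]
    refine List.ext_getElem (by simp; omega) ?_
    intro i h1 h2
    simp only [List.nil_append, List.getElem_map, List.getElem_range, List.length_map,
      List.length_range] at h1 h2 ⊢
    match i with
    | 0 => norm_num
    | i + 1 =>
      simp only [List.getElem_cons_succ, List.getElem_map, List.getElem_range]
      have hne : (0 : Int) + ((i + 1 : Nat) : Int) ≠ 0 := by push_cast; omega
      rw [if_neg hne]
      have h2' : (0 : Int) + ((i + 1 : Nat) : Int) + 1 = ((i + 2 : Nat) : Int) := by
        push_cast; ring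
      rw [h2', PySem.Int.floordiv_eq_ediv_of_pos (by omega)]
      omega
  · rw [if_neg hn]
    simp
    omega
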